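-- pv_equiv track=rewrite | github.com/briank621/camb-precip | scripts/GetDataMap.py | initializeStartStop
-- ===== SOURCE A (Python) =====
-- def leapYear(n):
--     return (n % 400 == 0) or ((n%4 == 0) and (n % 100 != 0));
--
-- def initializeStartStop(start, end, year):
--     start-=1
--     end-=1
--     dates = [31, 28, 31, 30, 31, 30, 31, 31, 30, 31, 30, 31]
--     datesL = [31, 29, 31, 30, 31, 30, 31, 31, 30, 31, 30, 31]
--     if(leapYear(year)):
--         d = dates
--         stop = 365 #the hadgem model only has 328 days
--     else:
--         d = dates
--         stop = 365
--
--     startIndex = 0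
--     for i in range(1, start):
--         startIndex += d[i-1]
--
--     if(start > end):
--         endIndex = 0
--         for i in range(0, end):
--             endIndex += d[i]
--     else:
--         endIndex = startIndex
--         # print "start:%d, end: %d, stop: %d" % (startIndex, endIndex, stop)
--         for i in range(start, end+1):
--             endIndex += d[i]
--
--     if endIndex > 328:
--         endIndex = 365
--
--     return (startIndex, endIndex, stop)
-- ===== SOURCE B (Python) =====
-- def initializeStartStop(start, end, year):
--     # Prefix sums over the (always non-leap) month-length table: P[k] = days before month k+1.
--     P = [0]
--     for m in (31, 28, 31, 30, 31, 30, 31, 31, 30, 31, 30, 31):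
--         P.append(P[-1] + m)
--     s = start - 1
--     e = end - 1
--     startIndex = P[s - 1] if s >= 1 else 0
--     if s > e:
--         endIndex = P[e] if e >= 1 else 0
--     else:
--         endIndex = startIndex + (P[e + 1] - P[s])
--     if endIndex > 328:
--         endIndex = 365
--     return (startIndex, endIndex, 365)
-- ===== Notes on version B (the rewrite author's own statement) =====
-- stated objective: simpler
-- what changed: Replaces A's three index-offset summing loops over the month table by a prefix-sum list built once, so every start/end index is a single table lookup or a difference of two prefix sums; the irrelevant leapYear branch (both arms identical) is dropped.
-- outside the precondition, e.g. on initializeStartStop(0, 5, 2000): A returns (0, 182, 365), B returns (0, -214, 365)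
import Mathlib
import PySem

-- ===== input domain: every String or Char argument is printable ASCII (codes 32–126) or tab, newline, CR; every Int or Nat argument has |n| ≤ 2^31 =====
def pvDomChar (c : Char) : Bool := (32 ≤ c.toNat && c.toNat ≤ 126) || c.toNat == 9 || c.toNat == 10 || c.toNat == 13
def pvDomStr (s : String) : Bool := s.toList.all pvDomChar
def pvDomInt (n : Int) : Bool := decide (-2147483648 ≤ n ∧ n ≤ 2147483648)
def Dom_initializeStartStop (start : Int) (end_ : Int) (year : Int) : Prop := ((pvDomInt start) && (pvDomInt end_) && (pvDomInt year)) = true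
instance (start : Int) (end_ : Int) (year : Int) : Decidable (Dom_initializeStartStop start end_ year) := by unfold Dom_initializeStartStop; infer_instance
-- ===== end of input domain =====

-- B computes both day-of-year indices from one prefix-sum table instead of A's three summing loops (objective: simpler).

-- ===== PORT A =====
def leapYear (n : Int) : Bool :=
  (PySem.Int.mod n 400 == 0) || ((PySem.Int.mod n 4 == 0) && (PySem.Int.mod n 100 != 0))

def initializeStartStop (start : Int) (end_ : Int) (year : Int) : Int × Int × Int :=
  let start := start - 1
  let end_ := end_ - 1
  let dates : List Int := [31, 28, 31, 30, 31, 30, 31, 31, 30, 31, 30, 31]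
  let _datesL : List Int := [31, 29, 31, 30, 31, 30, 31, 31, 30, 31, 30, 31]
  let d := if leapYear year then dates else dates
  let stop : Int := if leapYear year then 365 else 365
  let startIndex := (PySem.List.pyRange 1 start 1).foldl
    (fun acc i => acc + (PySem.List.pyGet? d (i - 1)).getD 0) 0
  let endIndex :=
    if start > end_ then
      (PySem.List.pyRange 0 end_ 1).foldl (fun acc i => acc + (PySem.List.pyGet? d i).getD 0) 0
    else
      (PySem.List.pyRange start (end_ + 1) 1).foldl
        (fun acc i => acc + (PySem.List.pyGet? d i).getD 0) startIndex
  let endIndex := if endIndex > 328 then 365 else endIndex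
  (startIndex, endIndex, stop)

-- ===== PORT B =====
def initializeStartStop_alt (start : Int) (end_ : Int) (year : Int) : Int × Int × Int :=
  let P : List Int := ([31, 28, 31, 30, 31, 30, 31, 31, 30, 31, 30, 31] : List Int).foldl
    (fun acc m => acc ++ [(PySem.List.pyGet? acc (-1)).getD 0 + m]) [0]
  let s := start - 1
  let e := end_ - 1
  let startIndex := if s ≥ 1 then (PySem.List.pyGet? P (s - 1)).getD 0 else 0
  let endIndex :=
    if s > e then
      (if e ≥ 1 then (PySem.List.pyGet? P e).getD 0 else 0)
    else
      startIndex + ((PySem.List.pyGet? P (e + 1)).getD 0 - (PySem.List.pyGet? P s).getD 0)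
  let endIndex := if endIndex > 328 then 365 else endIndex
  (startIndex, endIndex, 365)

-- ===== PRECONDITION & SPEC =====
-- Pre_ admits every input on which A returns (A raises IndexError beyond these bounds),
-- except non-positive `start` with start ≤ end: there A's summation hits Python's
-- negative-index wraparound on the month table, an accident of A's indexing that B's
-- prefix-sum table has no reason to reproduce.
def Pre_initializeStartStop (start : Int) (end_ : Int) (year : Int) : Prop :=
  start ≤ 14 ∧ ((end_ < start ∧ end_ ≤ 13) ∨ (1 ≤ start ∧ start ≤ end_ ∧ end_ ≤ 12))
instance (start : Int) (end_ : Int) (year : Int) : Decidable (Pre_initializeStartStop start end_ year) := by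
  unfold Pre_initializeStartStop; infer_instance

def pvWitness_initializeStartStop : Int × Int × Int := (3, 5, 2000)

def Spec_initializeStartStop (start : Int) (end_ : Int) (year : Int) (out : Int × Int × Int) : Prop := out = initializeStartStop_alt start end_ year
instance (start : Int) (end_ : Int) (year : Int) (out : Int × Int × Int) : Decidable (Spec_initializeStartStop start end_ year out) := by unfold Spec_initializeStartStop; infer_instance

-- ===== CLAIM (what is proved, stated in full; the proofs are below) =====
def Claim_equal_initializeStartStop : Prop := ∀ (start : Int) (end_ : Int) (year : Int), Dom_initializeStartStop start end_ year → Pre_initializeStartStop start end_ year → Spec_initializeStartStop start end_ year (initializeStartStop start end_ year)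

-- ===== LEMMAS AND PROOFS =====
-- range(a, b) is empty when b ≤ a (used for the empty-loop cases with non-positive months)
theorem pvRangeNil (a b : Int) (h : b ≤ a) : PySem.List.pyRange a b 1 = [] := by
  rw [PySem.List.pyRange_one]
  simp [Int.toNat_of_nonpos (by omega : b - a ≤ 0)]

-- ===== VERDICT (by name: the statement is the Claim_ definition above) =====
theorem initializeStartStop_spec : Claim_equal_initializeStartStop := by
  intro start end_ year _ hpre
  obtain ⟨h14, hcase⟩ := hpre
  unfold Spec_initializeStartStop initializeStartStop initializeStartStop_alt
  simp only [ite_self]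
  by_cases hs : 1 ≤ start
  · by_cases he : 1 ≤ end_
    · have he13 : end_ ≤ 13 := by rcases hcase with ⟨_, h⟩ | ⟨_, _, h⟩ <;> omega
      interval_cases start <;> interval_cases end_ <;>
        first | (exact absurd hcase (by decide)) | decide
    · -- end_ ≤ 0: A's range(0, end) loop is empty, B takes its e < 1 branch
      have hlt : end_ < start := by rcases hcase with ⟨h, _⟩ | ⟨_, h, _⟩ <;> omega
      interval_cases start <;>
        simp only [pvRangeNil 0 (end_ - 1) (by omega), List.foldl_nil] <;>
        split_ifs <;> first | omega | decide
  · -- start ≤ 0 (hence end_ < start ≤ 0): both loops empty on A's side, both ifs false on B's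
    have hlt : end_ < start := by rcases hcase with ⟨h, _⟩ | ⟨h, _, _⟩ <;> omega
    simp only [pvRangeNil 1 (start - 1) (by omega), pvRangeNil 0 (end_ - 1) (by omega),
      List.foldl_nil]
    split_ifs <;> first | omega | decide
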